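-- pv_equiv track=rewrite | github.com/perecuzi/Algorithms | Greedy Algorithms/car_fueling.py | compute_min_refills
-- ===== SOURCE A (Python) =====
-- def compute_min_refills(distance, miles_tank, n,  stops):
--     num_refills, current_refill = 0, 0
--     stops.insert(0, current_refill)
--     stops.append(distance)
--     while current_refill <= n:
--         last_refill = current_refill
--         while current_refill <= n and stops[current_refill+1] - stops[last_refill] <= miles_tank:
--             current_refill += 1
--         if current_refill == last_refill:
--             return -1
--         if current_refill <= n:
--             num_refills += 1
--     return num_refills
-- ===== SOURCE B (Python) =====
-- # B differences the route into a list of leg lengths first, then folds a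
-- # resettable fuel-used accumulator and leg counter over that list; no index
-- # pointer back into stops. Same in-place mutation of stops as A (insert 0,
-- # append distance); equivalence is about the return value.
-- def compute_min_refills(distance, miles_tank, n, stops):
--     stops.insert(0, 0)
--     stops.append(distance)
--     gaps = [stops[i + 1] - stops[i] for i in range(n + 1)]
--     refills, used, legs = 0, 0, 0
--     for g in gaps:
--         used += g
--         if used > miles_tank:
--             if legs == 0:
--                 return -1
--             refills, used, legs = refills + 1, g, 0
--             if used > miles_tank:
--                 return -1
--         legs += 1
--     return refills
-- ===== Notes on version B (the rewrite author's own statement) =====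
-- stated objective: alternative
-- what changed: A chases indices into stops with nested while loops, comparing each position against a remembered last-refill stop; B first builds the difference array of leg lengths and then folds a resettable fuel-used accumulator plus a leg counter over it, never indexing back into stops and keeping no refill pointer.
-- outside the precondition, e.g. on compute_min_refills(10, 0, 5, []): A returns -1, B raises IndexError
import Mathlib
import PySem

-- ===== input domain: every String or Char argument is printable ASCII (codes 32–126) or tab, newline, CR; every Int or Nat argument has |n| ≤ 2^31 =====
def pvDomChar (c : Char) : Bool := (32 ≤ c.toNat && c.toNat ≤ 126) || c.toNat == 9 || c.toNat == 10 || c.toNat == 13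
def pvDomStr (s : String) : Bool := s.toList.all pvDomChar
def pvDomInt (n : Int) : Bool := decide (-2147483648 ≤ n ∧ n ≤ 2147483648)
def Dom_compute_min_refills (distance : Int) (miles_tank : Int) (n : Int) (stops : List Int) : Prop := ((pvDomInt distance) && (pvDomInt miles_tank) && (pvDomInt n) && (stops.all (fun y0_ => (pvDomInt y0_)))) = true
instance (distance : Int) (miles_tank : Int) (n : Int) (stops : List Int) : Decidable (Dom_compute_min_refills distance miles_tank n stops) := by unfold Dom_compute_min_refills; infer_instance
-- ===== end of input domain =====

-- B builds the difference array of leg lengths and folds a resettable fuel-used accumulator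
-- plus leg counter over it, instead of A's nested whiles chasing indices against a last-refill
-- pointer (both Pythons also mutate `stops` identically in place; equivalence is about the return value).


-- ===== PORT A =====
-- inner while: advance current_refill while current_refill <= n and stops[cur+1] - stops[last] <= miles_tank.
-- The Nat argument is pure fuel making the loop total: it is always called with at least
-- (n + 1 - cur).toNat, which bounds the remaining iterations, so it never changes the result.
-- (Under Pre_ every index accessed is in range, so the default of pyGetD is never taken.)
def pvInnerA (s : List Int) (tank n last : Int) : Nat → Int → Int
  | 0, cur => cur
  | f + 1, cur =>
    if cur ≤ n ∧ PySem.List.pyGetD s (cur + 1) 0 - PySem.List.pyGetD s last 0 ≤ tank then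
      pvInnerA s tank n last f (cur + 1)
    else cur

-- outer while (fuel again bounds the iterations: current_refill strictly increases each pass)
def pvOuterA (s : List Int) (tank n : Int) : Nat → Int → Int → Int
  | 0, _, refills => refills
  | f + 1, cur, refills =>
    if cur ≤ n then
      -- last_refill := cur; run the inner while, then the two ifs of the outer body
      if pvInnerA s tank n cur ((n + 1 - cur).toNat) cur = cur then -1
      else pvOuterA s tank n f (pvInnerA s tank n cur ((n + 1 - cur).toNat) cur)
             (if pvInnerA s tank n cur ((n + 1 - cur).toNat) cur ≤ n then refills + 1 else refills)
    else refills

def compute_min_refills (distance : Int) (miles_tank : Int) (n : Int) (stops : List Int) : Int :=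
  pvOuterA ((0 : Int) :: stops ++ [distance]) miles_tank n ((n + 1).toNat) 0 0

-- ===== PORT B =====
-- the for-loop over the gap list: state (refills, used, legs), early returns -1
def pvFoldB (tank : Int) : List Int → Int → Int → Int → Int
  | [], refills, _, _ => refills
  | g :: rest, refills, used, legs =>
    if used + g > tank then
      if legs = 0 then -1
      else if g > tank then -1
      else pvFoldB tank rest (refills + 1) g 1
    else pvFoldB tank rest refills (used + g) (legs + 1)

-- gaps = [stops[i+1] - stops[i] for i in range(n+1)]  (indices in range under Pre_,
-- so the default of pyGetD is never taken)
def compute_min_refills_alt (distance : Int) (miles_tank : Int) (n : Int) (stops : List Int) : Int :=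
  let s := (0 : Int) :: stops ++ [distance]
  let gaps := (PySem.List.pyRange 0 (n + 1) 1).map
    (fun i => PySem.List.pyGetD s (i + 1) 0 - PySem.List.pyGetD s i 0)
  pvFoldB miles_tank gaps 0 0 0

-- ===== PRECONDITION & SPEC =====
-- Pre_ excludes n > len(stops): there A's stops[current_refill+1] can run past the padded list
-- and Python A raises IndexError (and B's comprehension does too); on the few such inputs where
-- A still returns (-1 from an early unreachable gap) B raises, so they are excluded with this
-- one condition.
def Pre_compute_min_refills (distance : Int) (miles_tank : Int) (n : Int) (stops : List Int) : Prop :=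
  n ≤ (stops.length : Int)
instance (distance : Int) (miles_tank : Int) (n : Int) (stops : List Int) : Decidable (Pre_compute_min_refills distance miles_tank n stops) := by unfold Pre_compute_min_refills; infer_instance

def pvWitness_compute_min_refills : Int × Int × Int × List Int := (10, 5, 2, [3, 6])

def Spec_compute_min_refills (distance : Int) (miles_tank : Int) (n : Int) (stops : List Int) (out : Int) : Prop := out = compute_min_refills_alt distance miles_tank n stops
instance (distance : Int) (miles_tank : Int) (n : Int) (stops : List Int) (out : Int) : Decidable (Spec_compute_min_refills distance miles_tank n stops out) := by unfold Spec_compute_min_refills; infer_instance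

-- ===== CLAIM (what is proved, stated in full; the proofs are below) =====
def Claim_equal_compute_min_refills : Prop := ∀ (distance : Int) (miles_tank : Int) (n : Int) (stops : List Int), Dom_compute_min_refills distance miles_tank n stops → Pre_compute_min_refills distance miles_tank n stops → Spec_compute_min_refills distance miles_tank n stops (compute_min_refills distance miles_tank n stops)

-- ===== LEMMAS AND PROOFS =====

-- Fuel-free (well-founded) versions of A's two loops, used only by the proofs.
def pvInnerW (s : List Int) (tank n last cur : Int) : Int :=
  if cur ≤ n ∧ PySem.List.pyGetD s (cur + 1) 0 - PySem.List.pyGetD s last 0 ≤ tank then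
    pvInnerW s tank n last (cur + 1)
  else cur
termination_by (n + 1 - cur).toNat
decreasing_by omega

theorem pvInnerW_ge (s : List Int) (tank n last cur : Int) : cur ≤ pvInnerW s tank n last cur := by
  rw [pvInnerW]
  split
  · have := pvInnerW_ge s tank n last (cur + 1)
    omega
  · omega
termination_by (n + 1 - cur).toNat
decreasing_by omega

def pvOuterW (s : List Int) (tank n cur refills : Int) : Int :=
  if h : cur ≤ n then
    if pvInnerW s tank n cur cur = cur then -1
    else pvOuterW s tank n (pvInnerW s tank n cur cur)
           (if pvInnerW s tank n cur cur ≤ n then refills + 1 else refills)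
  else refills
termination_by (n + 1 - cur).toNat
decreasing_by
  have := pvInnerW_ge s tank n cur cur
  omega

-- proof-only middle form: the flat indexed scan with a last-refill pointer
def pvGoW (s : List Int) (tank n i last refills : Int) : Int :=
  if i < n + 2 then
    if PySem.List.pyGetD s i 0 - PySem.List.pyGetD s last 0 > tank then
      if i - 1 = last then -1
      else
        if PySem.List.pyGetD s i 0 - PySem.List.pyGetD s (i - 1) 0 > tank then -1
        else pvGoW s tank n (i + 1) (i - 1) (refills + 1)
    else pvGoW s tank n (i + 1) last refills
  else refills
termination_by (n + 2 - i).toNat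
decreasing_by all_goals omega

-- Bridge: with enough fuel, each fuelled A-loop computes its fuel-free version.
theorem pvInnerA_eq_W (s : List Int) (tank n last : Int) :
    ∀ (f : Nat) (cur : Int), (n + 1 - cur).toNat ≤ f →
      pvInnerA s tank n last f cur = pvInnerW s tank n last cur := by
  intro f
  induction f with
  | zero =>
    intro cur hf
    rw [pvInnerA, pvInnerW, if_neg (by omega)]
  | succ f ih =>
    intro cur hf
    rw [pvInnerA]
    by_cases h : cur ≤ n ∧ PySem.List.pyGetD s (cur + 1) 0 - PySem.List.pyGetD s last 0 ≤ tank
    · rw [if_pos h, ih (cur + 1) (by omega)]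
      conv_rhs => rw [pvInnerW, if_pos h]
    · rw [if_neg h, pvInnerW, if_neg h]

theorem pvOuterA_eq_W (s : List Int) (tank n : Int) :
    ∀ (f : Nat) (cur r : Int), (n + 1 - cur).toNat ≤ f →
      pvOuterA s tank n f cur r = pvOuterW s tank n cur r := by
  intro f
  induction f with
  | zero =>
    intro cur r hf
    rw [pvOuterA, pvOuterW, dif_neg (by omega)]
  | succ f ih =>
    intro cur r hf
    rw [pvOuterA]
    by_cases h : cur ≤ n
    · rw [if_pos h, pvInnerA_eq_W s tank n cur ((n + 1 - cur).toNat) cur (le_refl _)]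
      rw [pvOuterW, dif_pos h]
      by_cases hs : pvInnerW s tank n cur cur = cur
      · rw [if_pos hs, if_pos hs]
      · have hge := pvInnerW_ge s tank n cur cur
        rw [if_neg hs, if_neg hs,
            ih (pvInnerW s tank n cur cur) _ (by omega)]
    · rw [if_neg h, pvOuterW, dif_neg h]

-- A's "num_refills += 1 only if current_refill <= n" followed by the loop test, folded outward:
theorem pv_outer_push (s : List Int) (tank n cur r : Int) :
    pvOuterW s tank n cur (if cur ≤ n then r + 1 else r)
      = if cur ≤ n then pvOuterW s tank n cur (r + 1) else r := by
  by_cases h : cur ≤ n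
  · rw [if_pos h, if_pos h]
  · rw [if_neg h, if_neg h, pvOuterW, dif_neg h]

-- one successful step of the inner while
theorem pv_inner_step (s : List Int) (tank n last cur : Int)
    (hn : cur ≤ n) (hgap : PySem.List.pyGetD s (cur + 1) 0 - PySem.List.pyGetD s last 0 ≤ tank) :
    pvInnerW s tank n last cur = pvInnerW s tank n last (cur + 1) := by
  conv_lhs => rw [pvInnerW]
  rw [if_pos ⟨hn, hgap⟩]

-- a failing test stops the inner while
theorem pv_inner_stop (s : List Int) (tank n last cur : Int)
    (h : ¬ (cur ≤ n ∧ PySem.List.pyGetD s (cur + 1) 0 - PySem.List.pyGetD s last 0 ≤ tank)) :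
    pvInnerW s tank n last cur = cur := by
  rw [pvInnerW, if_neg h]

-- A mid-scan correspondence: A's value from inner-loop state (last = c, cursor cur, refills r)
-- equals the flat scan's value from state (i = cur + 1, last = c, refills r), whenever c < cur.
theorem pv_key (s : List Int) (tank n : Int) :
    ∀ (cur c r : Int), c < cur →
      (if pvInnerW s tank n c cur ≤ n
        then pvOuterW s tank n (pvInnerW s tank n c cur) (r + 1)
        else r)
      = pvGoW s tank n (cur + 1) c r := by
  intro cur c r hc
  have hcanc : cur + 1 - 1 = cur := by ring
  rw [pvGoW, hcanc]
  by_cases hn : cur ≤ n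
  · rw [if_pos (by omega : cur + 1 < n + 2)]
    by_cases hgap : PySem.List.pyGetD s (cur + 1) 0 - PySem.List.pyGetD s c 0 ≤ tank
    · -- inner loop advances; the scan continues with the same last
      rw [if_neg (by omega : ¬ PySem.List.pyGetD s (cur + 1) 0 - PySem.List.pyGetD s c 0 > tank)]
      rw [pv_inner_step s tank n c cur hn hgap]
      exact pv_key s tank n (cur + 1) c r (by omega)
    · -- inner loop stops at cur ≤ n: A refills at cur; the scan refills at i - 1 = cur
      rw [pv_inner_stop s tank n c cur (by tauto), if_pos hn]
      rw [if_pos (by omega : PySem.List.pyGetD s (cur + 1) 0 - PySem.List.pyGetD s c 0 > tank)]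
      rw [if_neg (by omega : ¬ cur = c)]
      rw [pvOuterW, dif_pos hn]
      by_cases hg2 : PySem.List.pyGetD s (cur + 1) 0 - PySem.List.pyGetD s cur 0 > tank
      · -- stuck immediately at the new refill point: both return -1
        rw [if_pos hg2, pv_inner_stop s tank n cur cur (by omega), if_pos rfl]
      · rw [if_neg hg2, pv_inner_step s tank n cur cur hn (by omega)]
        have hge := pvInnerW_ge s tank n cur (cur + 1)
        rw [if_neg (by omega : ¬ pvInnerW s tank n cur (cur + 1) = cur), pv_outer_push]
        exact pv_key s tank n (cur + 1) cur (r + 1) (by omega)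
  · -- cur > n: inner loop stops, A returns r; the scan's loop condition fails, returns r
    rw [pv_inner_stop s tank n c cur (by tauto)]
    rw [if_neg hn, if_neg (by omega : ¬ cur + 1 < n + 2)]
termination_by cur => (n + 2 - cur).toNat
decreasing_by all_goals omega

theorem pv_top (s : List Int) (tank n : Int) :
    pvOuterW s tank n 0 0 = pvGoW s tank n 1 0 0 := by
  rw [pvOuterW, pvGoW]
  rw [(by ring : (1 : Int) - 1 = 0)]
  by_cases hn : (0 : Int) ≤ n
  · rw [dif_pos hn, if_pos (by omega : (1 : Int) < n + 2)]
    by_cases hgap : PySem.List.pyGetD s 1 0 - PySem.List.pyGetD s 0 0 ≤ tank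
    · have hstep := pv_inner_step s tank n 0 0 hn (by rw [zero_add]; exact hgap)
      rw [zero_add] at hstep
      have hge := pvInnerW_ge s tank n 0 1
      rw [hstep, if_neg (by omega : ¬ pvInnerW s tank n 0 1 = 0), pv_outer_push]
      rw [if_neg (by omega : ¬ PySem.List.pyGetD s 1 0 - PySem.List.pyGetD s 0 0 > tank)]
      have := pv_key s tank n 1 0 0 (by omega)
      rw [(by ring : (1 : Int) + 1 = 2)] at this
      exact this
    · have hstop := pv_inner_stop s tank n 0 0 (by rw [zero_add]; tauto)
      rw [hstop, if_pos rfl]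
      rw [if_pos (by omega : PySem.List.pyGetD s 1 0 - PySem.List.pyGetD s 0 0 > tank), if_pos rfl]
  · rw [dif_neg hn, if_neg (by omega : ¬ (1 : Int) < n + 2)]

-- The flat scan at state (i, last, r) equals B's fold over the remaining gaps with
-- used = s[i-1] - s[last] and legs = (i-1) - last.
theorem pv_fold_key (s : List Int) (tank n : Int) :
    ∀ (i last r : Int), 1 ≤ i → last ≤ i - 1 →
      pvGoW s tank n i last r
        = pvFoldB tank
            ((PySem.List.pyRange (i - 1) (n + 1) 1).map
              (fun j => PySem.List.pyGetD s (j + 1) 0 - PySem.List.pyGetD s j 0))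
            r (PySem.List.pyGetD s (i - 1) 0 - PySem.List.pyGetD s last 0) (i - 1 - last) := by
  intro i last r hi hlast
  rw [pvGoW]
  by_cases hrange : i < n + 2
  · rw [if_pos hrange,
        PySem.List.pyRange_one_cons (by omega : i - 1 < n + 1), List.map_cons, pvFoldB]
    have hidx : i - 1 + 1 = i := by ring
    rw [hidx]
    by_cases hgap : PySem.List.pyGetD s i 0 - PySem.List.pyGetD s last 0 > tank
    · rw [if_pos hgap,
          if_pos (by omega :
            PySem.List.pyGetD s (i - 1) 0 - PySem.List.pyGetD s last 0
              + (PySem.List.pyGetD s i 0 - PySem.List.pyGetD s (i - 1) 0) > tank)]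
      by_cases hstuck : i - 1 = last
      · rw [if_pos hstuck, if_pos (by omega : i - 1 - last = 0)]
      · rw [if_neg hstuck, if_neg (by omega : ¬ i - 1 - last = 0)]
        by_cases hg2 : PySem.List.pyGetD s i 0 - PySem.List.pyGetD s (i - 1) 0 > tank
        · rw [if_pos hg2, if_pos hg2]
        · rw [if_neg hg2, if_neg hg2,
              pv_fold_key s tank n (i + 1) (i - 1) (r + 1) (by omega) (by omega)]
          have h1 : i + 1 - 1 = i := by ring
          have h2 : i - (i - 1) = (1 : Int) := by ring
          rw [h1, h2]
    · rw [if_neg hgap,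
          if_neg (by omega :
            ¬ PySem.List.pyGetD s (i - 1) 0 - PySem.List.pyGetD s last 0
              + (PySem.List.pyGetD s i 0 - PySem.List.pyGetD s (i - 1) 0) > tank),
          pv_fold_key s tank n (i + 1) last r (by omega) (by omega)]
      have h1 : i + 1 - 1 = i := by ring
      rw [h1]
      have h3 : PySem.List.pyGetD s (i - 1) 0 - PySem.List.pyGetD s last 0
          + (PySem.List.pyGetD s i 0 - PySem.List.pyGetD s (i - 1) 0)
          = PySem.List.pyGetD s i 0 - PySem.List.pyGetD s last 0 := by ring
      have h4 : i - last = i - 1 - last + 1 := by ring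
      rw [h3, h4]
  · rw [if_neg hrange]
    have hempty : PySem.List.pyRange (i - 1) (n + 1) 1 = [] := by
      rw [PySem.List.pyRange_one]
      have : (n + 1 - (i - 1)).toNat = 0 := by omega
      rw [this]
      simp
    rw [hempty, List.map_nil, pvFoldB]
termination_by i _ _ => (n + 2 - i).toNat
decreasing_by all_goals omega

-- ===== VERDICT (by name: the statement is the Claim_ definition above) =====
theorem compute_min_refills_spec : Claim_equal_compute_min_refills := by
  intro distance miles_tank n stops _ _
  unfold Spec_compute_min_refills compute_min_refills compute_min_refills_alt
  rw [pvOuterA_eq_W _ miles_tank n _ 0 0 (by omega), pv_top]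
  have := pv_fold_key ((0 : Int) :: stops ++ [distance]) miles_tank n 1 0 0
    (by omega) (by omega)
  simpa using this
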